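-- pv_equiv track=rewrite | github.com/appsulautomacao/sistema | adapters/whatsapp/service.py | canonicalize_client_phone
-- ===== SOURCE A (Python) =====
-- def canonicalize_client_phone(remote_jid=None, sender_pn=None, current_phone=None):
--     candidates = [sender_pn, current_phone, remote_jid]
--
--     for candidate in candidates:
--         if not candidate:
--             continue
--
--         normalized = str(candidate).strip()
--         if normalized.endswith("@s.whatsapp.net") or normalized.endswith("@c.us"):
--             return normalized
--
--     for candidate in candidates:
--         if candidate:
--             return str(candidate).strip()
--
--     return None
-- ===== SOURCE B (Python) =====
-- def canonicalize_client_phone(remote_jid=None, sender_pn=None, current_phone=None):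
--     fallback = None
--     for candidate in (sender_pn, current_phone, remote_jid):
--         if not candidate:
--             continue
--         normalized = str(candidate).strip()
--         if normalized.endswith("@s.whatsapp.net") or normalized.endswith("@c.us"):
--             return normalized
--         if fallback is None:
--             fallback = normalized
--     return fallback
-- ===== Notes on version B (the rewrite author's own statement) =====
-- stated objective: simpler
-- what changed: Fuses A's two scans over the candidate list into one pass that carries a fallback accumulator (first truthy candidate, stripped), returning early only on a JID-suffix match.
import Mathlib
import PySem

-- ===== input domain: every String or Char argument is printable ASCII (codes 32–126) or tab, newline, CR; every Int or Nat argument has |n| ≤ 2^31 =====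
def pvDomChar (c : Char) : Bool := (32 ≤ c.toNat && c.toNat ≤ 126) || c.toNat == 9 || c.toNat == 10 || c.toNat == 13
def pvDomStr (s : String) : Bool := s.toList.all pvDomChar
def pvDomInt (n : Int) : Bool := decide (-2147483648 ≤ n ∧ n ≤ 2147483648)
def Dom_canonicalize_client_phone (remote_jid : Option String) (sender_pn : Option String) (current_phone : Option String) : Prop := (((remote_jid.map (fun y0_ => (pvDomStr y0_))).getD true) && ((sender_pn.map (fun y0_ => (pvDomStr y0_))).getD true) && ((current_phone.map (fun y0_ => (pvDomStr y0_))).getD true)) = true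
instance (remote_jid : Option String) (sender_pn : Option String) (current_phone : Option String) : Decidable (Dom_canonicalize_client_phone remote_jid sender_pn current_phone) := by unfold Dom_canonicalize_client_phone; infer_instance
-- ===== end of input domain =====

-- ===== PORT A =====
-- A: first scan returns the stripped candidate when it ends with a JID suffix; a second
-- scan returns the stripped first truthy candidate; else None.
def pvIsJid (n : String) : Bool :=
  PySem.Str.endswith n "@s.whatsapp.net" || PySem.Str.endswith n "@c.us"

def pvTruthy (c : Option String) : Bool :=
  match c with
  | none => false
  | some s => s != ""

def pvLoop1 : List (Option String) → Option String
  | [] => none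
  | c :: rest =>
    if pvTruthy c then
      let normalized := PySem.Str.strip (c.getD "")
      if pvIsJid normalized then some normalized else pvLoop1 rest
    else pvLoop1 rest

def pvLoop2 : List (Option String) → Option String
  | [] => none
  | c :: rest =>
    if pvTruthy c then some (PySem.Str.strip (c.getD "")) else pvLoop2 rest

def canonicalize_client_phone (remote_jid : Option String) (sender_pn : Option String) (current_phone : Option String) : Option String :=
  let candidates := [sender_pn, current_phone, remote_jid]
  match pvLoop1 candidates with
  | some r => some r
  | none => pvLoop2 candidates

-- ===== PORT B =====
-- B: one pass carrying a fallback accumulator (set at the first truthy candidate).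
def pvLoopB : List (Option String) → Option String → Option String
  | [], fallback => fallback
  | c :: rest, fallback =>
    if pvTruthy c then
      let normalized := PySem.Str.strip (c.getD "")
      if pvIsJid normalized then some normalized
      else pvLoopB rest (if fallback = none then some normalized else fallback)
    else pvLoopB rest fallback

def canonicalize_client_phone_alt (remote_jid : Option String) (sender_pn : Option String) (current_phone : Option String) : Option String :=
  pvLoopB [sender_pn, current_phone, remote_jid] none

-- ===== PRECONDITION & SPEC =====
def Spec_canonicalize_client_phone (remote_jid : Option String) (sender_pn : Option String) (current_phone : Option String) (out : Option String) : Prop := out = canonicalize_client_phone_alt remote_jid sender_pn current_phone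
instance (remote_jid : Option String) (sender_pn : Option String) (current_phone : Option String) (out : Option String) : Decidable (Spec_canonicalize_client_phone remote_jid sender_pn current_phone out) := by unfold Spec_canonicalize_client_phone; infer_instance

-- ===== CLAIM (what is proved, stated in full; the proofs are below) =====
def Claim_equal_canonicalize_client_phone : Prop := ∀ (remote_jid : Option String) (sender_pn : Option String) (current_phone : Option String), Dom_canonicalize_client_phone remote_jid sender_pn current_phone → Spec_canonicalize_client_phone remote_jid sender_pn current_phone (canonicalize_client_phone remote_jid sender_pn current_phone)

-- ===== LEMMAS AND PROOFS =====

theorem pvLoopB_eq (cs : List (Option String)) (fb : Option String) :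
    pvLoopB cs fb =
      match pvLoop1 cs with
      | some r => some r
      | none => match fb with
        | some f => some f
        | none => pvLoop2 cs := by
  induction cs generalizing fb with
  | nil => cases fb <;> simp [pvLoopB, pvLoop1, pvLoop2]
  | cons c rest ih =>
    by_cases ht : pvTruthy c = true
    · by_cases hj : pvIsJid (PySem.Str.strip (c.getD "")) = true
      · simp [pvLoopB, pvLoop1, ht, hj]
      · cases fb <;> simp [pvLoopB, pvLoop1, pvLoop2, ht, hj, ih]
    · simp [pvLoopB, pvLoop1, pvLoop2, ht, ih]

-- ===== VERDICT (by name: the statement is the Claim_ definition above) =====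
theorem canonicalize_client_phone_spec : Claim_equal_canonicalize_client_phone := by
  intro rj sp cp _
  unfold Spec_canonicalize_client_phone canonicalize_client_phone canonicalize_client_phone_alt
  rw [pvLoopB_eq]
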